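-- pv_equiv track=rewrite | github.com/cherenkov-plenoscope/pyslidescape | pyslidescape/utils.py | laods_layers_txt
-- ===== SOURCE A (Python) =====
-- def laods_layers_txt(s):
--     layers = {}
--     current_layer = None
--     for line in str.splitlines(s):
--         if len(line) > 0:
--             first_char = line[0]
--             if str.isspace(first_char):
--                 assert (
--                     current_layer is not None
--                 ), "Expected layer before speech."
--                 layers[current_layer].append(str.strip(line))
--             else:
--                 current_layer = line
--                 layers[current_layer] = []
--     return layers
-- ===== SOURCE B (Python) =====
-- def laods_layers_txt(s):
--     lines = str.splitlines(s)
--     heads = [i for i, ln in enumerate(lines) if ln and not str.isspace(ln[0])]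
--     first = heads[0] if heads else len(lines)
--     assert all(len(ln) == 0 for ln in lines[:first]), "Expected layer before speech."
--     bounds = heads + [len(lines)]
--     layers = {}
--     for a, b in zip(heads, bounds[1:]):
--         layers[lines[a]] = [str.strip(ln) for ln in lines[a + 1 : b] if ln]
--     return layers
-- ===== Notes on version B (the rewrite author's own statement) =====
-- stated objective: alternative
-- what changed: B replaces A's single stateful pass (current-layer variable, dict entries mutated by append) with an index-based decomposition: compute the header line indices once, check the pre-header prefix for the assert, then build each layer's line list in one slice between consecutive header indices.
import Mathlib
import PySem

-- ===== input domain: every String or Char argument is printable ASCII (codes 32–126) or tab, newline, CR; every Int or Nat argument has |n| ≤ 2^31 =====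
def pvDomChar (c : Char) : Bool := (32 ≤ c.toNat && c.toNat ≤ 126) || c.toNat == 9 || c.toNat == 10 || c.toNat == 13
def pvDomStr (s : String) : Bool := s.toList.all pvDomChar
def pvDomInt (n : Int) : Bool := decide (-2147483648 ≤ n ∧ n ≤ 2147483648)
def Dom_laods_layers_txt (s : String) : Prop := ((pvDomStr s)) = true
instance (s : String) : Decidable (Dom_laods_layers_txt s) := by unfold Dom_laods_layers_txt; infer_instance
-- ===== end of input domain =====

-- B parses by locating header-line indices and slicing between them, instead of A's
-- stateful current-layer pass; same return value (alternative decomposition, no speed claim).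

-- ===== PORT A =====
def pvStepA (st : PySem.Dict String (List String) × Option String) (line : String) :
    PySem.Dict String (List String) × Option String :=
  match line.toList with
  | [] => st
  | c :: _ =>
    if PySem.Chars.isspace c then
      match st.2 with
      | none => st   -- Python raises AssertionError "Expected layer before speech." here (excluded by Pre_)
      | some cur => (st.1.modify cur [] (fun v => v ++ [PySem.Str.strip line]), st.2)
    else (st.1.insert line [], some line)

def laods_layers_txt (s : String) : List (String × List String) :=
  (((PySem.Str.splitlines s).foldl pvStepA (PySem.Dict.empty, none)).1).items

-- ===== PORT B =====
-- 'ln and not ln[0].isspace()'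
def pvHdr (l : String) : Bool :=
  match l.toList with
  | [] => false
  | c :: _ => !PySem.Chars.isspace c

def laods_layers_txt_alt (s : String) : List (String × List String) :=
  let lines := PySem.Str.splitlines s
  let heads := ((PySem.List.enumerate lines).filter (fun p => pvHdr p.2)).map (fun p => p.1)
  let first := heads.headD (PySem.List.len lines)
  if (PySem.List.slice lines none (some first)).all (fun ln => PySem.Str.len ln == 0) then
    let bounds := heads ++ [PySem.List.len lines]
    ((heads.zip (bounds.drop 1)).foldl
      (fun d p =>
        d.insert (PySem.List.pyGetD lines p.1 "")
          (((PySem.List.slice lines (some (p.1 + 1)) (some p.2)).filter (fun ln => ln ≠ "")).map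
            PySem.Str.strip))
      PySem.Dict.empty).items
  else []   -- Python raises AssertionError "Expected layer before speech." here (excluded by Pre_)

-- ===== PRECONDITION & SPEC =====
-- Pre_ excludes exactly the inputs on which A raises AssertionError: a nonempty indented
-- line occurring before the first header line.
def Pre_laods_layers_txt (s : String) : Prop :=
  (((PySem.Str.splitlines s).dropWhile (fun l => l == "")).head?.all pvHdr) = true
instance (s : String) : Decidable (Pre_laods_layers_txt s) := by
  unfold Pre_laods_layers_txt; infer_instance

def pvWitness_laods_layers_txt : String := "hdr\n  a\n\nhdr2\n\tb"

def Spec_laods_layers_txt (s : String) (out : List (String × List String)) : Prop :=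
  out = laods_layers_txt_alt s
instance (s : String) (out : List (String × List String)) : Decidable (Spec_laods_layers_txt s out) := by
  unfold Spec_laods_layers_txt; infer_instance

-- ===== CLAIM (what is proved, stated in full; the proofs are below) =====
def Claim_equal_laods_layers_txt : Prop :=
  ∀ (s : String), Dom_laods_layers_txt s → Pre_laods_layers_txt s →
    Spec_laods_layers_txt s (laods_layers_txt s)

-- ===== LEMMAS AND PROOFS =====

-- splits a list of lines at the first header line
def pvSplit1 : List String → List String × List String
  | [] => ([], [])
  | l :: ls => if pvHdr l then ([], l :: ls) else
      let p := pvSplit1 ls; (l :: p.1, p.2)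

lemma pvSplit1_snd_length_le (ls : List String) : (pvSplit1 ls).2.length ≤ ls.length := by
  induction ls with
  | nil => simp [pvSplit1]
  | cons l ls ih =>
    simp only [pvSplit1]
    split
    · simp
    · simpa using Nat.le_succ_of_le ih

def pvBody (ls : List String) : List String :=
  ((pvSplit1 ls).1.filter (fun l => l ≠ "")).map PySem.Str.strip

def pvGroups : List String → List (String × List String)
  | [] => []
  | l :: ls =>
    if pvHdr l then (l, pvBody ls) :: pvGroups (pvSplit1 ls).2 else pvGroups ls
termination_by ls => ls.length
decreasing_by
  · exact Nat.lt_succ_of_le (pvSplit1_snd_length_le ls)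
  · exact Nat.lt_succ_self _

def pvApplyG (d : PySem.Dict String (List String)) (gs : List (String × List String)) :
    PySem.Dict String (List String) :=
  gs.foldl (fun d g => d.insert g.1 g.2) d


lemma pvMapIteSelf {ν : Type} (k : String) (v : ν) :
    ∀ (l : List (String × ν)), (l.map Prod.fst).Nodup →
      (l.find? (fun p => p.1 == k)).map Prod.snd = some v →
      l.map (fun p => if p.1 == k then (k, v) else p) = l := by
  intro l
  induction l with
  | nil => simp
  | cons p t ih =>
    intro hnd hf
    by_cases hp : p.1 = k
    · have hb : (p.1 == k) = true := by simpa using hp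
      simp only [List.find?_cons, hb, Option.map_some, Option.some.injEq] at hf
      have hnot : ∀ q ∈ t, ¬ ((q.1 == k) = true) := by
        intro q hq hqk
        simp only [List.map_cons, List.nodup_cons] at hnd
        exact hnd.1 (by
          have : q.1 = k := by simpa using hqk
          rw [hp, ← this]; exact List.mem_map_of_mem hq)
      simp only [List.map_cons, hb, if_pos]
      refine congrArg₂ List.cons ?_ ?_
      · rw [← hp, ← hf]
      · have : t.map (fun p => if (p.1 == k) = true then (k, v) else p) = t.map id := by
          apply List.map_congr_left
          intro q hq
          rw [if_neg (hnot q hq)]; rfl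
        simpa using this
    · have hb : (p.1 == k) = false := by simpa using hp
      simp only [List.find?_cons, hb] at hf
      simp only [List.map_cons, hb, Bool.false_eq_true, if_false]
      simp only [List.map_cons, List.nodup_cons] at hnd
      exact congrArg₂ List.cons rfl (ih hnd.2 (by simpa using hf))

lemma pvInsertSelf {ν : Type} (d : PySem.Dict String ν) (k : String) (d0 : ν)
    (hnd : d.keys.Nodup) (hc : d.contains k = true) :
    d.insert k (d.getD k d0) = d := by
  have hfind : (d.items.find? (fun p => p.1 == k)).isSome := by
    rw [List.find?_isSome]
    simpa [PySem.Dict.contains, List.any_eq_true] using hc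
  obtain ⟨q, hq⟩ := Option.isSome_iff_exists.mp hfind
  have hgetD : d.getD k d0 = q.2 := by
    simp [PySem.Dict.getD, PySem.Dict.get?, hq]
  apply PySem.Dict.ext
  simp only [PySem.Dict.insert, hc, if_pos]
  exact pvMapIteSelf k (d.getD k d0) d.items hnd (by simp [hq, hgetD])

lemma pvModifyModify {ν : Type} (d : PySem.Dict String ν) (k : String) (d0 : ν) (f g : ν → ν) :
    (d.modify k d0 f).modify k d0 g = d.modify k d0 (fun v => g (f v)) := by
  simp [PySem.Dict.modify, PySem.Dict.getD_insert_self, PySem.Dict.insert_insert_self]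

lemma pvModifyInsert {ν : Type} (d : PySem.Dict String ν) (k : String) (v d0 : ν) (f : ν → ν) :
    (d.insert k v).modify k d0 f = d.insert k (f v) := by
  simp [PySem.Dict.modify, PySem.Dict.getD_insert_self, PySem.Dict.insert_insert_self]

lemma pvModifyId {ν : Type} (d : PySem.Dict String ν) (k : String) (d0 : ν)
    (hnd : d.keys.Nodup) (hc : d.contains k = true) :
    d.modify k d0 (fun v => v) = d := by
  simpa [PySem.Dict.modify] using pvInsertSelf d k d0 hnd hc

lemma pvNodupModify {ν : Type} (d : PySem.Dict String ν) (k : String) (d0 : ν) (f : ν → ν)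
    (hnd : d.keys.Nodup) : (d.modify k d0 f).keys.Nodup := by
  simpa [PySem.Dict.modify] using PySem.Dict.nodup_keys_insert d k _ hnd

-- pvHdr by first character
lemma pvHdr_nil {l : String} (hl : l.toList = []) : pvHdr l = false := by
  simp [pvHdr, hl]
lemma pvHdr_space {l : String} {c : Char} {cs : List Char} (hl : l.toList = c :: cs)
    (hc : PySem.Chars.isspace c = true) : pvHdr l = false := by
  simp [pvHdr, hl, hc]
lemma pvHdr_head {l : String} {c : Char} {cs : List Char} (hl : l.toList = c :: cs)
    (hc : PySem.Chars.isspace c = false) : pvHdr l = true := by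
  simp [pvHdr, hl, hc]

lemma pvApplyG_nil (d : PySem.Dict String (List String)) : pvApplyG d [] = d := rfl
lemma pvApplyG_cons (d : PySem.Dict String (List String)) (g : String × List String)
    (gs : List (String × List String)) : pvApplyG d (g :: gs) = pvApplyG (d.insert g.1 g.2) gs := rfl

lemma pvSplit1_cons_hdr {l : String} (ls : List String) (h : pvHdr l = true) :
    pvSplit1 (l :: ls) = ([], l :: ls) := by simp [pvSplit1, h]
lemma pvSplit1_cons_not {l : String} (ls : List String) (h : pvHdr l = false) :
    pvSplit1 (l :: ls) = (l :: (pvSplit1 ls).1, (pvSplit1 ls).2) := by simp [pvSplit1, h]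

lemma pvBody_cons_hdr {l : String} (ls : List String) (h : pvHdr l = true) :
    pvBody (l :: ls) = [] := by simp [pvBody, pvSplit1_cons_hdr ls h]
lemma pvBody_cons_empty (ls : List String) {l : String} (hl : l = "") (h : pvHdr l = false) :
    pvBody (l :: ls) = pvBody ls := by
  subst hl; simp [pvBody, pvSplit1_cons_not ls h]
lemma pvBody_cons_ne (ls : List String) {l : String} (hl : l ≠ "") (h : pvHdr l = false) :
    pvBody (l :: ls) = PySem.Str.strip l :: pvBody ls := by
  simp [pvBody, pvSplit1_cons_not ls h, hl]

lemma pvGroups_cons_hdr {l : String} (ls : List String) (h : pvHdr l = true) :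
    pvGroups (l :: ls) = (l, pvBody ls) :: pvGroups (pvSplit1 ls).2 := by
  rw [pvGroups]; simp [h]
lemma pvGroups_cons_not {l : String} (ls : List String) (h : pvHdr l = false) :
    pvGroups (l :: ls) = pvGroups ls := by
  rw [pvGroups]; simp [h]

lemma pvA_run : ∀ (ls : List String) (d : PySem.Dict String (List String)) (h : String),
    d.keys.Nodup → d.contains h = true →
    (ls.foldl pvStepA (d, some h)).1
      = pvApplyG (d.modify h [] (fun v => v ++ pvBody ls)) (pvGroups (pvSplit1 ls).2) := by
  intro ls
  induction ls with
  | nil =>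
    intro d h hnd hc
    have he : (fun v : List String => v ++ pvBody []) = fun v => v := by
      funext v; simp [pvBody, pvSplit1]
    simp only [List.foldl_nil, pvSplit1, pvGroups, pvApplyG_nil, he]
    exact (pvModifyId d h [] hnd hc).symm
  | cons l ls ih =>
    intro d h hnd hc
    rcases hl : l.toList with _ | ⟨c, cs⟩
    · have hh := pvHdr_nil hl
      have hl0 : l = "" := String.toList_eq_nil_iff.mp hl
      rw [List.foldl_cons]
      have hstep : pvStepA (d, some h) l = (d, some h) := by simp [pvStepA, hl]
      rw [hstep, ih d h hnd hc, pvSplit1_cons_not ls hh, pvBody_cons_empty ls hl0 hh]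
    · by_cases hsp : PySem.Chars.isspace c = true
      · have hh := pvHdr_space hl hsp
        have hl0 : l ≠ "" := by intro h0; rw [h0] at hl; simp at hl
        rw [List.foldl_cons]
        have hstep : pvStepA (d, some h) l
            = (d.modify h [] (fun v => v ++ [PySem.Str.strip l]), some h) := by
          simp [pvStepA, hl, hsp]
        rw [hstep,
          ih _ h (pvNodupModify d h [] _ hnd) (by simp [PySem.Dict.contains_modify]),
          pvModifyModify, pvSplit1_cons_not ls hh, pvBody_cons_ne ls hl0 hh]
        congr 1
        congr 1
        funext v; simp
      · have hsp' : PySem.Chars.isspace c = false := by simpa using hsp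
        have hh := pvHdr_head hl hsp'
        rw [List.foldl_cons]
        have hstep : pvStepA (d, some h) l = (d.insert l [], some l) := by
          simp [pvStepA, hl, hsp']
        rw [hstep, ih _ l (PySem.Dict.nodup_keys_insert d l [] hnd)
              (PySem.Dict.contains_insert_self d l []),
          pvModifyInsert, pvSplit1_cons_hdr ls hh, pvBody_cons_hdr ls hh,
          pvGroups_cons_hdr ls hh, pvApplyG_cons]
        have he : (fun v : List String => v ++ ([] : List String)) = fun v => v := by
          funext v; simp
        simp only [he, List.nil_append]
        rw [pvModifyId d h [] hnd hc]

lemma pvFoldA_empties : ∀ (E : List String) (st : PySem.Dict String (List String) × Option String),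
    (∀ l ∈ E, l = "") → E.foldl pvStepA st = st := by
  intro E
  induction E with
  | nil => intro st _; rfl
  | cons l E ih =>
    intro st hE
    have hl : l = "" := hE l (by simp)
    have hstep : pvStepA st l = st := by
      subst hl; simp [pvStepA]
    rw [List.foldl_cons, hstep]
    exact ih st (fun x hx => hE x (by simp [hx]))

lemma pvHdr_true_elim {l : String} (h : pvHdr l = true) :
    ∃ c cs, l.toList = c :: cs ∧ PySem.Chars.isspace c = false := by
  rcases hl : l.toList with _ | ⟨c, cs⟩
  · rw [pvHdr_nil hl] at h; simp at h
  · refine ⟨c, cs, rfl, ?_⟩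
    by_cases hc : PySem.Chars.isspace c = true
    · rw [pvHdr_space hl hc] at h; simp at h
    · simpa using hc

lemma pvGroups_skip : ∀ (E r : List String), (∀ l ∈ E, pvHdr l = false) →
    pvGroups (E ++ r) = pvGroups r := by
  intro E
  induction E with
  | nil => simp
  | cons l E ih =>
    intro r hE
    rw [List.cons_append, pvGroups_cons_not _ (hE l (by simp))]
    exact ih r (fun x hx => hE x (by simp [hx]))

lemma pvA_eq (L : List String)
    (hpre : ((L.dropWhile (fun l => l == "")).head?.all pvHdr) = true) :
    (L.foldl pvStepA (PySem.Dict.empty, none)).1 = pvApplyG PySem.Dict.empty (pvGroups L) := by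
  have hsplit : L.takeWhile (fun l => l == "") ++ L.dropWhile (fun l => l == "") = L :=
    List.takeWhile_append_dropWhile
  have hE : ∀ l ∈ L.takeWhile (fun l => l == ""), l = "" := by
    intro l hl
    simpa using List.mem_takeWhile_imp hl
  have hEh : ∀ l ∈ L.takeWhile (fun l => l == ""), pvHdr l = false := by
    intro l hl; rw [hE l hl]; rfl
  have hGE : pvGroups (L.takeWhile (fun l => l == "")) = [] := by
    have h1 := pvGroups_skip (L.takeWhile (fun l => l == "")) [] hEh
    rw [List.append_nil] at h1
    rw [h1, pvGroups]
  rcases hD : L.dropWhile (fun l => l == "") with _ | ⟨hd, rest⟩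
  · rw [← hsplit, hD, List.append_nil, pvFoldA_empties _ _ hE, hGE]
    rfl
  · have hhd : pvHdr hd = true := by
      rw [hD] at hpre; simpa using hpre
    obtain ⟨c, cs, hcl, hcs⟩ := pvHdr_true_elim hhd
    rw [← hsplit, hD, List.foldl_append, pvFoldA_empties _ _ hE, List.foldl_cons]
    have hstep : pvStepA (PySem.Dict.empty, none) hd
        = (PySem.Dict.empty.insert hd [], some hd) := by
      simp [pvStepA, hcl, hcs]
    rw [hstep, pvA_run rest _ hd
        (PySem.Dict.nodup_keys_insert _ hd [] PySem.Dict.nodup_keys_empty)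
        (PySem.Dict.contains_insert_self _ hd []),
      pvModifyInsert, pvGroups_skip _ _ hEh, pvGroups_cons_hdr rest hhd, pvApplyG_cons]
    simp

-- B-side: header indices of a list of lines, starting at offset n
def pvHf (n : Int) (M : List String) : List Int :=
  ((PySem.List.enumerate M n).filter (fun p => pvHdr p.2)).map (fun p => p.1)

lemma pvHf_nil (n : Int) : pvHf n [] = [] := rfl

lemma pvHf_cons_hdr {l : String} (ls : List String) (n : Int) (h : pvHdr l = true) :
    pvHf n (l :: ls) = n :: pvHf (n + 1) ls := by
  simp [pvHf, PySem.List.enumerate_cons, h]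

lemma pvHf_cons_not {l : String} (ls : List String) (n : Int) (h : pvHdr l = false) :
    pvHf n (l :: ls) = pvHf (n + 1) ls := by
  simp [pvHf, PySem.List.enumerate_cons, h]

lemma pvHf_append_empties : ∀ (P : List String) (r : List String) (n : Int),
    (∀ l ∈ P, pvHdr l = false) → pvHf n (P ++ r) = pvHf (n + P.length) r := by
  intro P
  induction P with
  | nil => simp
  | cons l P ih =>
    intro r n hP
    rw [List.cons_append, pvHf_cons_not _ n (hP l (by simp)),
      ih r (n + 1) (fun x hx => hP x (by simp [hx]))]
    congr 1
    simp only [List.length_cons]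
    push_cast
    ring

lemma pvSplit1_append : ∀ (ls : List String), (pvSplit1 ls).1 ++ (pvSplit1 ls).2 = ls := by
  intro ls
  induction ls with
  | nil => rfl
  | cons l ls ih =>
    by_cases h : pvHdr l = true
    · rw [pvSplit1_cons_hdr ls h]; simp
    · rw [pvSplit1_cons_not ls (by simpa using h)]
      simpa using ih

lemma pvSplit1_fst_not : ∀ (ls : List String), ∀ x ∈ (pvSplit1 ls).1, pvHdr x = false := by
  intro ls
  induction ls with
  | nil => simp [pvSplit1]
  | cons l ls ih =>
    by_cases h : pvHdr l = true
    · rw [pvSplit1_cons_hdr ls h]; simp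
    · rw [pvSplit1_cons_not ls (by simpa using h)]
      intro x hx
      rcases List.mem_cons.mp hx with rfl | hx
      · simpa using h
      · exact ih x hx

lemma pvSplit1_snd_head : ∀ (ls : List String) {h : String} {t : List String},
    (pvSplit1 ls).2 = h :: t → pvHdr h = true := by
  intro ls
  induction ls with
  | nil => simp [pvSplit1]
  | cons l ls ih =>
    intro h t heq
    by_cases hh : pvHdr l = true
    · rw [pvSplit1_cons_hdr ls hh] at heq
      obtain ⟨rfl, rfl⟩ := List.cons.inj (by simpa using heq : l :: ls = h :: t)
      exact hh
    · rw [pvSplit1_cons_not ls (by simpa using hh)] at heq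
      exact ih heq

lemma pvB_loop (L : List String) : ∀ (n : Nat) (r : List String) (k : Nat)
    (d : PySem.Dict String (List String)),
    r.length ≤ n → L.drop k = r →
    ((pvHf (k : Int) r).zip (((pvHf (k : Int) r) ++ [PySem.List.len L]).drop 1)).foldl
        (fun d p => d.insert (PySem.List.pyGetD L p.1 "")
          (((PySem.List.slice L (some (p.1 + 1)) (some p.2)).filter (fun ln => ln ≠ "")).map
            PySem.Str.strip)) d
      = pvApplyG d (pvGroups r) := by
  intro n
  induction n with
  | zero =>
    intro r k d hn hdrop
    have hr : r = [] := List.length_eq_zero_iff.mp (Nat.le_zero.mp hn)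
    subst hr
    rw [pvHf_nil, pvGroups]
    rfl
  | succ n ih =>
    intro r k d hn hdrop
    cases r with
    | nil =>
      rw [pvHf_nil, pvGroups]
      rfl
    | cons l ls =>
      have hk : k < L.length := by
        have := congrArg List.length hdrop
        simp only [List.length_drop, List.length_cons] at this
        omega
      have hLk : L[k]? = some l := by
        rw [← List.head?_drop, hdrop]; rfl
      have hdrop1 : L.drop (k + 1) = ls := by
        have h1 : L.drop (k + 1) = (L.drop k).drop 1 := by
          rw [List.drop_drop]
        rw [h1, hdrop]; rfl
      have hkey : PySem.List.pyGetD L (k : Int) "" = l := by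
        rw [PySem.List.pyGetD_natCast, List.getD_eq_getElem?_getD, hLk]; rfl
      by_cases hh : pvHdr l = true
      · -- l is a header line
        have hls : (pvSplit1 ls).1 ++ (pvSplit1 ls).2 = ls := pvSplit1_append ls
        have hPnot : ∀ x ∈ (pvSplit1 ls).1, pvHdr x = false := pvSplit1_fst_not ls
        have hfk := pvHf_cons_hdr ls (k : Int) hh
        have hfls : pvHf ((k : Int) + 1) ls
            = pvHf ((k : Int) + 1 + ((pvSplit1 ls).1.length : Int)) (pvSplit1 ls).2 := by
          conv_lhs => rw [← hls]
          exact pvHf_append_empties _ _ _ hPnot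
        have hlsP : ls.drop (pvSplit1 ls).1.length = (pvSplit1 ls).2 := by
          nth_rewrite 2 [← hls]
          exact List.drop_left
        have hlsTake : ls.take (pvSplit1 ls).1.length = (pvSplit1 ls).1 := by
          nth_rewrite 2 [← hls]
          exact List.take_left
        have hGr : pvGroups (l :: ls) = (l, pvBody ls) :: pvGroups (pvSplit1 ls).2 :=
          pvGroups_cons_hdr ls hh
        rcases hR : (pvSplit1 ls).2 with _ | ⟨h', t⟩
        · -- no further header: single pair (k, len L)
          have hPls : (pvSplit1 ls).1 = ls := by
            have h2 := hls
            rw [hR, List.append_nil] at h2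
            exact h2
          have hval : ((PySem.List.slice L (some ((k : Int) + 1))
                (some (PySem.List.len L))).filter (fun ln => ln ≠ "")).map PySem.Str.strip
              = pvBody ls := by
            have hcast : (k : Int) + 1 = ((k + 1 : Nat) : Int) := by push_cast; ring
            rw [PySem.List.len_eq, hcast, PySem.List.slice_natCast, hdrop1]
            have hlen : L.length - (k + 1) = ls.length := by
              have := congrArg List.length hdrop1
              simp only [List.length_drop] at this
              omega
            rw [hlen, List.take_length]
            simp only [pvBody, hPls]
          rw [hfk, hfls, hR, pvHf_nil]
          simp only [List.cons_append, List.nil_append, List.drop_succ_cons, List.drop_zero,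
            List.zip_cons_cons, List.zip_nil_left, List.foldl_cons, List.foldl_nil]
          rw [hkey, hval, hGr, hR, pvApplyG_cons, pvGroups]
          rfl
        · -- next header at absolute index b = k + 1 + P.length
          have hh' : pvHdr h' = true := pvSplit1_snd_head ls hR
          have hdropb : L.drop (k + 1 + (pvSplit1 ls).1.length) = h' :: t := by
            have h1 : L.drop (k + 1 + (pvSplit1 ls).1.length)
                = (L.drop (k + 1)).drop (pvSplit1 ls).1.length := by
              rw [List.drop_drop]
            rw [h1, hdrop1, hlsP, hR]
          have hcastb : (k : Int) + 1 + ((pvSplit1 ls).1.length : Int)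
              = ((k + 1 + (pvSplit1 ls).1.length : Nat) : Int) := by push_cast; ring
          have hfR := pvHf_cons_hdr t ((k + 1 + (pvSplit1 ls).1.length : Nat) : Int) hh'
          have hval : ((PySem.List.slice L (some ((k : Int) + 1))
                (some ((k + 1 + (pvSplit1 ls).1.length : Nat) : Int))).filter
                  (fun ln => ln ≠ "")).map PySem.Str.strip
              = pvBody ls := by
            have hcast : (k : Int) + 1 = ((k + 1 : Nat) : Int) := by push_cast; ring
            rw [hcast, PySem.List.slice_natCast, hdrop1]
            have hsub : k + 1 + (pvSplit1 ls).1.length - (k + 1) = (pvSplit1 ls).1.length := by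
              omega
            rw [hsub, hlsTake]
            rfl
          have hrec := ih (h' :: t) (k + 1 + (pvSplit1 ls).1.length)
            (d.insert (PySem.List.pyGetD L (k : Int) "")
              (((PySem.List.slice L (some ((k : Int) + 1))
                (some ((k + 1 + (pvSplit1 ls).1.length : Nat) : Int))).filter
                  (fun ln => ln ≠ "")).map PySem.Str.strip))
            (by
              have h1 : (h' :: t).length ≤ ls.length := by
                rw [← hls, hR]
                simp
              have h2 : ls.length ≤ n := by
                simp only [List.length_cons] at hn
                omega
              omega)
            hdropb
          rw [hfk, hfls, hR, hcastb, hfR]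
          simp only [List.cons_append, List.drop_succ_cons, List.drop_zero, List.zip_cons_cons,
            List.foldl_cons]
          rw [hfR] at hrec
          simp only [List.cons_append, List.drop_succ_cons, List.drop_zero,
            List.zip_cons_cons] at hrec
          rw [hrec, hkey, hval, hGr, hR, pvApplyG_cons]
      · -- l is not a header line
        have hh' : pvHdr l = false := by simpa using hh
        have hGr : pvGroups (l :: ls) = pvGroups ls := pvGroups_cons_not ls hh'
        have hcast : (k : Int) + 1 = ((k + 1 : Nat) : Int) := by push_cast; ring
        rw [pvHf_cons_not ls (k : Int) hh', hcast, hGr]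
        exact ih ls (k + 1) d (by simp only [List.length_cons] at hn; omega) hdrop1

lemma pvB_eq (s : String)
    (hpre : (((PySem.Str.splitlines s).dropWhile (fun l => l == "")).head?.all pvHdr) = true) :
    laods_layers_txt_alt s
      = (pvApplyG PySem.Dict.empty (pvGroups (PySem.Str.splitlines s))).items := by
  simp only [laods_layers_txt_alt]
  generalize hLdef : PySem.Str.splitlines s = L at *
  have hE : ∀ l ∈ L.takeWhile (fun l => l == ""), l = "" := by
    intro l hl; simpa using List.mem_takeWhile_imp hl
  have hEh : ∀ l ∈ L.takeWhile (fun l => l == ""), pvHdr l = false := by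
    intro l hl; rw [hE l hl]; rfl
  have hsplit : L.takeWhile (fun l => l == "") ++ L.dropWhile (fun l => l == "") = L :=
    List.takeWhile_append_dropWhile
  generalize hEdef : L.takeWhile (fun l => l == "") = E at hE hEh hsplit
  generalize hDdef : L.dropWhile (fun l => l == "") = D at hpre hsplit
  have hdropE : L.drop E.length = D := by
    rw [← hsplit]; exact List.drop_left
  have hheads : pvHf 0 L = pvHf (E.length : Int) D := by
    rw [← hsplit, pvHf_append_empties E D 0 hEh]
    norm_num
  have hGL : pvGroups L = pvGroups D := by
    rw [← hsplit]; exact pvGroups_skip E D hEh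
  have hHF : ((PySem.List.enumerate L).filter (fun p => pvHdr p.2)).map (fun p => p.1)
      = pvHf 0 L := rfl
  rw [hHF, hheads, hGL]
  rcases hD : D with _ | ⟨hd, rest⟩
  · -- no header at all: all lines are empty
    have hEL : E = L := by rw [← hsplit, hD, List.append_nil]
    rw [pvHf_nil]
    have hcond : (PySem.List.slice L none
        (some (([] : List Int).headD (PySem.List.len L)))).all
          (fun ln => PySem.Str.len ln == 0) = true := by
      simp only [List.headD_nil, PySem.List.len_eq, PySem.List.slice_to_natCast,
        List.take_length, List.all_eq_true]
      intro ln hln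
      rw [hE ln (by rw [hEL]; exact hln)]
      rfl
    rw [if_pos hcond, pvGroups]
    rfl
  · have hhd : pvHdr hd = true := by
      rw [hD] at hpre; simpa using hpre
    have hfd : pvHf (E.length : Int) (hd :: rest)
        = (E.length : Int) :: pvHf ((E.length : Int) + 1) rest := pvHf_cons_hdr rest _ hhd
    have hcond : (PySem.List.slice L none
        (some ((((E.length : Int) :: pvHf ((E.length : Int) + 1) rest)).headD
          (PySem.List.len L)))).all (fun ln => PySem.Str.len ln == 0) = true := by
      simp only [List.headD_cons, PySem.List.slice_to_natCast, List.all_eq_true]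
      rw [← hsplit, List.take_left]
      intro ln hln
      rw [hE ln hln]
      rfl
    rw [hfd, if_pos hcond, ← hfd, ← hD]
    exact congrArg PySem.Dict.items (pvB_loop L D.length D E.length PySem.Dict.empty
      (le_refl _) hdropE)

theorem laods_layers_txt_spec : Claim_equal_laods_layers_txt := by
  intro s _ hpre
  unfold Pre_laods_layers_txt at hpre
  unfold Spec_laods_layers_txt laods_layers_txt
  rw [pvA_eq (PySem.Str.splitlines s) hpre, pvB_eq s hpre]
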